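-- pv_equiv track=rewrite | github.com/sasteu/pratica-computacao-grafica | main.py | listar_todos_vertices
-- ===== SOURCE A (Python) =====
-- def listar_todos_vertices(faces):
--     vertices = []
--
--     for face in faces:
--         for vertice in face:
--             if vertice not in vertices:
--                 vertices.append(vertice)
--
--     vertices.sort()
--     return vertices
-- ===== SOURCE B (Python) =====
-- def listar_todos_vertices(faces):
--     todos = sorted(v for face in faces for v in face)
--     vertices = []
--     for v in todos:
--         if not vertices or vertices[-1] != v:
--             vertices.append(v)
--     return vertices
-- ===== Notes on version B (the rewrite author's own statement) =====
-- stated objective: faster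
-- what changed: Replaces the quadratic build (membership scan of the growing unique list for every vertex) by flatten + one sort + a single adjacent-dedup pass over the sorted list.
import Mathlib
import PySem

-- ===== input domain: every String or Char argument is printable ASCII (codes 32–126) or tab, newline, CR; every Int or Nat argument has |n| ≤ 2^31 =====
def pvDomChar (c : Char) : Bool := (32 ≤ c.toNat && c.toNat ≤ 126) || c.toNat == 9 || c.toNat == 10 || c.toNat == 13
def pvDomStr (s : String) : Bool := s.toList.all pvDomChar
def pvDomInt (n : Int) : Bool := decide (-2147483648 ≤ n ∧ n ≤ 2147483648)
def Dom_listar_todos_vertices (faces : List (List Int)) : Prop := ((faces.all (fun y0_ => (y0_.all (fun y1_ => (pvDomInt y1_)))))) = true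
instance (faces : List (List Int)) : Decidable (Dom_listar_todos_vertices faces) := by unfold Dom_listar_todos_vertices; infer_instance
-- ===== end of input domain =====

-- B replaces A's quadratic unique-collection (membership scan per vertex) by
-- flatten + sort + one adjacent-dedup pass (objective: faster).

-- ===== PORT A =====
def listar_todos_vertices (faces : List (List Int)) : List Int :=
  let vertices :=
    faces.foldl (fun vertices face =>
      face.foldl (fun vertices vertice =>
        if vertice ∈ vertices then vertices else vertices ++ [vertice]) vertices) []
  PySem.List.sorted vertices (fun x => x) false

-- ===== PORT B =====
def listar_todos_vertices_alt (faces : List (List Int)) : List Int :=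
  let todos := PySem.List.sorted (faces.flatMap (fun face => face)) (fun x => x) false
  todos.foldl (fun vertices v =>
    if vertices.getLast? = some v then vertices else vertices ++ [v]) []

-- ===== PRECONDITION & SPEC =====
def Spec_listar_todos_vertices (faces : List (List Int)) (out : List Int) : Prop := out = listar_todos_vertices_alt faces
instance (faces : List (List Int)) (out : List Int) : Decidable (Spec_listar_todos_vertices faces out) := by unfold Spec_listar_todos_vertices; infer_instance

-- ===== CLAIM (what is proved, stated in full; the proofs are below) =====
def Claim_equal_listar_todos_vertices : Prop := ∀ (faces : List (List Int)), Dom_listar_todos_vertices faces → Spec_listar_todos_vertices faces (listar_todos_vertices faces)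

-- ===== LEMMAS AND PROOFS =====

-- A's inner collection step preserves Nodup and collects exactly the members.
theorem collect_fold (l acc : List Int) :
    ((l.foldl (fun vs v => if v ∈ vs then vs else vs ++ [v]) acc).Nodup ↔ acc.Nodup) ∧
    (∀ x, x ∈ l.foldl (fun vs v => if v ∈ vs then vs else vs ++ [v]) acc ↔ x ∈ acc ∨ x ∈ l) := by
  induction l generalizing acc with
  | nil => simp
  | cons v t ih =>
    by_cases hv : v ∈ acc
    · have h := ih acc
      simp only [List.foldl_cons, if_pos hv]
      refine ⟨h.1, fun x => ?_⟩
      rw [h.2 x, List.mem_cons]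
      constructor
      · rintro (h1 | h1) <;> tauto
      · rintro (h1 | rfl | h1)
        exacts [Or.inl h1, Or.inl hv, Or.inr h1]
    · have h := ih (acc ++ [v])
      simp only [List.foldl_cons, if_neg hv]
      refine ⟨?_, fun x => ?_⟩
      · rw [h.1, List.nodup_append]
        constructor
        · exact fun hn => hn.1
        · intro hn
          refine ⟨hn, List.nodup_singleton v, ?_⟩
          intro a ha b hb
          simp only [List.mem_singleton] at hb
          subst hb
          exact fun h => hv (h ▸ ha)
      rw [h.2 x]
      simp only [List.mem_append, List.mem_cons]
      tauto

-- In a strictly increasing list, an element that bounds all others is the last one.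
theorem last_of_max (acc : List Int) (h : acc.Pairwise (· < ·)) (a : Int)
    (ha : a ∈ acc) (hmax : ∀ b ∈ acc, b ≤ a) : acc.getLast? = some a := by
  induction acc with
  | nil => simp at ha
  | cons x xs ih =>
    cases xs with
    | nil =>
      simp at ha; simp [ha]
    | cons y ys =>
      rw [List.getLast?_cons_cons]
      rcases List.mem_cons.1 ha with rfl | ha'
      · exfalso
        have hy : a < y := (List.pairwise_cons.1 h).1 y (by simp)
        have := hmax y (by simp)
        omega
      · exact ih (List.pairwise_cons.1 h).2 ha' (fun b hb => hmax b (List.mem_cons_of_mem _ hb))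

-- B's adjacent-dedup fold: on a ≤-sorted remainder with a <-sorted accumulator below it,
-- the result is <-sorted and holds exactly the members.
theorem dedup_fold (l : List Int) : ∀ (acc : List Int), acc.Pairwise (· < ·) →
    (∀ a ∈ acc, ∀ b ∈ l, a ≤ b) → l.Pairwise (· ≤ ·) →
    (l.foldl (fun vs v => if vs.getLast? = some v then vs else vs ++ [v]) acc).Pairwise (· < ·) ∧
    (∀ x, x ∈ l.foldl (fun vs v => if vs.getLast? = some v then vs else vs ++ [v]) acc ↔ x ∈ acc ∨ x ∈ l) := by
  induction l with
  | nil => intro acc hacc _ _; simpa using hacc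
  | cons v t ih =>
    intro acc hacc hle hl
    by_cases hv : acc.getLast? = some v
    · have hvmem : v ∈ acc := List.mem_of_getLast? hv
      simp only [List.foldl_cons, if_pos hv]
      have h := ih acc hacc (fun a ha b hb => hle a ha b (List.mem_cons_of_mem _ hb))
        (List.pairwise_cons.1 hl).2
      refine ⟨h.1, fun x => ?_⟩
      rw [h.2 x, List.mem_cons]
      constructor
      · rintro (h1 | h1) <;> tauto
      · rintro (h1 | rfl | h1)
        exacts [Or.inl h1, Or.inl hvmem, Or.inr h1]
    · simp only [List.foldl_cons, if_neg hv]
      have hlt : ∀ a ∈ acc, a < v := by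
        intro a ha
        rcases lt_or_eq_of_le (hle a ha v (by simp)) with h1 | rfl
        · exact h1
        · exact absurd (last_of_max acc hacc a ha (fun b hb => hle b hb a (by simp))) hv
      have hacc' : (acc ++ [v]).Pairwise (· < ·) := by
        rw [List.pairwise_append]; exact ⟨hacc, by simp, by simpa using hlt⟩
      have hle' : ∀ a ∈ acc ++ [v], ∀ b ∈ t, a ≤ b := by
        intro a ha b hb
        rcases List.mem_append.1 ha with ha' | ha'
        · exact hle a ha' b (List.mem_cons_of_mem _ hb)
        · simp at ha'; subst ha'
          exact (List.pairwise_cons.1 hl).1 b hb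
      have h := ih (acc ++ [v]) hacc' hle' (List.pairwise_cons.1 hl).2
      refine ⟨h.1, fun x => ?_⟩
      rw [h.2 x]
      simp only [List.mem_append, List.mem_cons]
      tauto

-- ===== VERDICT (by name: the statement is the Claim_ definition above) =====
theorem listar_todos_vertices_spec : Claim_equal_listar_todos_vertices := by
  intro faces _
  unfold Spec_listar_todos_vertices listar_todos_vertices listar_todos_vertices_alt
  simp only
  set flat := faces.flatMap (fun face => face) with hflat
  -- A's collected list equals (in Nodup/membership) flat
  have hA := collect_fold flat []
  rw [hflat, List.foldl_flatMap] at hA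
  simp only [List.not_mem_nil, false_or, List.nodup_nil] at hA
  -- B's result: apply the dedup invariant to the sorted flat list
  have hs := PySem.List.sorted_pairwise flat (fun x => x) (κ := Int)
  simp only [] at hs
  have hB := dedup_fold (PySem.List.sorted flat (fun x => x) false) []
    (by simp) (by simp) hs
  set accA := faces.foldl (fun vertices face =>
      face.foldl (fun vertices vertice =>
        if vertice ∈ vertices then vertices else vertices ++ [vertice]) vertices) [] with haccA
  set r := (PySem.List.sorted flat (fun x => x) false).foldl
      (fun vs v => if vs.getLast? = some v then vs else vs ++ [v]) [] with hr
  -- r is a strictly increasing rearrangement of accA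
  have hmem : ∀ x, x ∈ r ↔ x ∈ accA := by
    intro x
    rw [hB.2 x, hA.2 x]
    simp [PySem.List.mem_sorted, hflat]
  have hrnodup : r.Nodup := hB.1.imp (fun h => ne_of_lt h)
  have hperm : r.Perm accA :=
    (List.perm_ext_iff_of_nodup hrnodup (hA.1.2 trivial)).2 hmem
  exact PySem.List.sorted_eq_of_perm_of_pairwise_lt accA r (fun x => x) hperm hB.1
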